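-- pv_equiv track=rewrite | github.com/zcl576/mysql-mcp | mysql_mcp/core.py | _has_meaningful_sql_content
-- ===== SOURCE A (Python) =====
-- def _has_meaningful_sql_content(fragment: str) -> bool:
--     # 用来判断分号后面是否还有真正的 SQL 内容，而不只是空白或注释。
--     in_line_comment = False
--     in_block_comment = False
--     index = 0
--
--     while index < len(fragment):
--         current = fragment[index]
--         next_char = fragment[index + 1] if index + 1 < len(fragment) else ""
--
--         if in_line_comment:
--             if current == "\n":
--                 in_line_comment = False
--             index += 1
--             continue
--
--         if in_block_comment:
--             if current == "*" and next_char == "/":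
--                 in_block_comment = False
--                 index += 2
--                 continue
--             index += 1
--             continue
--
--         if current.isspace():
--             index += 1
--             continue
--         if current == "-" and next_char == "-" and _line_comment_start(fragment, index):
--             in_line_comment = True
--             index += 2
--             continue
--         if current == "#":
--             in_line_comment = True
--             index += 1
--             continue
--         if current == "/" and next_char == "*":
--             in_block_comment = True
--             index += 2
--             continue
--         return True
--
--     return False
--
-- def _line_comment_start(sql: str, index: int) -> bool:
--     # MySQL 的 -- 注释要求前后是空白边界，这里单独抽出来判断。
--     previous_char = sql[index - 1] if index > 0 else ""
--     following_char = sql[index + 2] if index + 2 < len(sql) else ""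
--     previous_ok = not previous_char or previous_char.isspace()
--     following_ok = not following_char or following_char.isspace()
--     return previous_ok and following_ok
-- ===== SOURCE B (Python) =====
-- def _has_meaningful_sql_content(fragment: str) -> bool:
--     # Prefix-consuming scanner: skip whitespace and jump over whole comments
--     # with find/slicing instead of a per-character flag state machine.
--     i, n = 0, len(fragment)
--     while i < n:
--         c = fragment[i]
--         if c.isspace():
--             i += 1
--         elif c == "#":
--             j = fragment.find("\n", i)
--             i = n if j < 0 else j + 1
--         elif c == "/" and fragment.startswith("/*", i):
--             j = fragment.find("*/", i + 2)
--             i = n if j < 0 else j + 2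
--         elif (fragment.startswith("--", i)
--               and (i == 0 or fragment[i - 1].isspace())
--               and (i + 2 >= n or fragment[i + 2].isspace())):
--             j = fragment.find("\n", i)
--             i = n if j < 0 else j + 1
--         else:
--             return True
--     return False
-- ===== Notes on version B (the rewrite author's own statement) =====
-- stated objective: alternative
-- what changed: Replaced the per-character two-flag (in_line_comment/in_block_comment) state machine with a prefix-consuming scanner that, at each non-space position, recognises a whole comment and jumps past its end with str.find/slicing, returning True at the first non-comment character.
import Mathlib
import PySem

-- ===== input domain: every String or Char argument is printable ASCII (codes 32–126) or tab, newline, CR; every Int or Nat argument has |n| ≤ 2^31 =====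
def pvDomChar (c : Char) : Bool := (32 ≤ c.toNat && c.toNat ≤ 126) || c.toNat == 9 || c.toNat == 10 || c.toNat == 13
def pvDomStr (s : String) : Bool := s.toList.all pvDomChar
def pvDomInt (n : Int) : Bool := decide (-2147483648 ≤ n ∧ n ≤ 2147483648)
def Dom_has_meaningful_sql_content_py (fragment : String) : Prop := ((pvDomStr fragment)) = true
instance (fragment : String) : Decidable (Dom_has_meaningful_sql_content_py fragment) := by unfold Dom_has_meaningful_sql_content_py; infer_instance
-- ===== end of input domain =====

-- B replaces A's per-character flag state machine by a prefix-consuming scanner that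
-- jumps over whole comments; same return value (alternative decomposition, no speed claim).

-- ===== PORT A =====
-- "" / absent char counts as ok; otherwise Python's .isspace() on the one char
def pvOptSpace (o : Option Char) : Bool :=
  match o with
  | none => true
  | some c => PySem.Chars.isspace c

-- _line_comment_start: previous/following char each absent or whitespace
def lineCommentStart (prev following : Option Char) : Bool :=
  pvOptSpace prev && pvOptSpace following

-- A's while loop: remaining chars, previous char (fragment[index-1]), the two flags
def hasMsgA (l : List Char) (prev : Option Char) (inLine inBlock : Bool) : Bool :=
  match l with
  | [] => false
  | c :: rest =>
    if inLine then
      if c = '\n' then hasMsgA rest (some c) false inBlock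
      else hasMsgA rest (some c) inLine inBlock
    else if inBlock then
      if c = '*' ∧ rest.head? = some '/' then hasMsgA rest.tail (some '/') inLine false
      else hasMsgA rest (some c) inLine inBlock
    else if PySem.Chars.isspace c then hasMsgA rest (some c) inLine inBlock
    else if c = '-' ∧ rest.head? = some '-' ∧ lineCommentStart prev rest.tail.head? = true then
      hasMsgA rest.tail (some '-') true inBlock
    else if c = '#' then hasMsgA rest (some c) true inBlock
    else if c = '/' ∧ rest.head? = some '*' then hasMsgA rest.tail (some '*') inLine true
    else true
termination_by l.length
decreasing_by all_goals (simp only [List.length_cons, List.length_tail]; omega)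

def has_meaningful_sql_content_py (fragment : String) : Bool :=
  hasMsgA fragment.toList none false false

-- ===== PORT B =====
-- Source B's `fragment.find("\n", i)` + `j + 1` jump: everything after the first '\n' ([] if none)
def skipLineB (l : List Char) : List Char :=
  match l with
  | [] => []
  | c :: rest => if c = '\n' then rest else skipLineB rest

-- Source B's `fragment.find("*/", i + 2)` + `j + 2` jump: everything after the first "*/" ([] if none)
def skipBlockB (l : List Char) : List Char :=
  match l with
  | [] => []
  | c :: rest => if c = '*' ∧ rest.head? = some '/' then rest.tail else skipBlockB rest

theorem skipLineB_length_le (l : List Char) : (skipLineB l).length ≤ l.length := by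
  induction l with
  | nil => simp [skipLineB]
  | cons c rest ih =>
    simp only [skipLineB]; split
    · simp
    · simp; omega

theorem skipBlockB_length_le (l : List Char) : (skipBlockB l).length ≤ l.length := by
  induction l with
  | nil => simp [skipBlockB]
  | cons c rest ih =>
    simp only [skipBlockB]; split
    · simp only [List.length_cons, List.length_tail]; omega
    · simp; omega

-- Source B's while loop: remaining chars and `i == 0 or fragment[i-1].isspace()`
def hasMsgB (l : List Char) (bnd : Bool) : Bool :=
  match l with
  | [] => false
  | c :: rest =>
    if PySem.Chars.isspace c then hasMsgB rest true
    else if c = '#' then hasMsgB (skipLineB rest) true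
    else if c = '/' ∧ rest.head? = some '*' then hasMsgB (skipBlockB rest.tail) false
    else if c = '-' ∧ rest.head? = some '-' ∧ bnd = true ∧ pvOptSpace rest.tail.head? = true then
      hasMsgB (skipLineB rest.tail) true
    else true
termination_by l.length
decreasing_by
  · simp
  · have := skipLineB_length_le rest; simp; omega
  · have h1 := skipBlockB_length_le rest.tail
    have h2 : rest.tail.length ≤ rest.length := by cases rest <;> simp
    simp; omega
  · have h1 := skipLineB_length_le rest.tail
    have h2 : rest.tail.length ≤ rest.length := by cases rest <;> simp
    simp; omega

def has_meaningful_sql_content_py_alt (fragment : String) : Bool :=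
  hasMsgB fragment.toList true

-- ===== PRECONDITION & SPEC =====
def Spec_has_meaningful_sql_content_py (fragment : String) (out : Bool) : Prop := out = has_meaningful_sql_content_py_alt fragment
instance (fragment : String) (out : Bool) : Decidable (Spec_has_meaningful_sql_content_py fragment out) := by unfold Spec_has_meaningful_sql_content_py; infer_instance

-- ===== CLAIM (what is proved, stated in full; the proofs are below) =====
def Claim_equal_has_meaningful_sql_content_py : Prop := ∀ (fragment : String), Dom_has_meaningful_sql_content_py fragment → Spec_has_meaningful_sql_content_py fragment (has_meaningful_sql_content_py fragment)

-- ===== LEMMAS AND PROOFS =====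

-- unfolding of A's loop in the normal (no-comment) state
theorem hasMsgA_step (c : Char) (rest : List Char) (prev : Option Char) :
    hasMsgA (c :: rest) prev false false =
      (if PySem.Chars.isspace c then hasMsgA rest (some c) false false
       else if c = '-' ∧ rest.head? = some '-' ∧ lineCommentStart prev rest.tail.head? = true then
         hasMsgA rest.tail (some '-') true false
       else if c = '#' then hasMsgA rest (some c) true false
       else if c = '/' ∧ rest.head? = some '*' then hasMsgA rest.tail (some '*') false true
       else true) := by
  conv_lhs => rw [hasMsgA.eq_def]
  rfl

-- unfolding of B's loop
theorem hasMsgB_step (c : Char) (rest : List Char) (bnd : Bool) :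
    hasMsgB (c :: rest) bnd =
      (if PySem.Chars.isspace c then hasMsgB rest true
       else if c = '#' then hasMsgB (skipLineB rest) true
       else if c = '/' ∧ rest.head? = some '*' then hasMsgB (skipBlockB rest.tail) false
       else if c = '-' ∧ rest.head? = some '-' ∧ bnd = true ∧ pvOptSpace rest.tail.head? = true then
         hasMsgB (skipLineB rest.tail) true
       else true) := by
  conv_lhs => rw [hasMsgB.eq_def]

-- in a line comment, A scans to the first '\n' and resumes after it with prev = '\n'
theorem hasMsgA_line (l : List Char) (prev : Option Char) :
    hasMsgA l prev true false = hasMsgA (skipLineB l) (some '\n') false false := by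
  induction l generalizing prev with
  | nil => simp [hasMsgA, skipLineB]
  | cons c rest ih =>
    by_cases h : c = '\n'
    · subst h; simp [hasMsgA, skipLineB]
    · simp [hasMsgA, skipLineB, h, ih]

-- in a block comment, A scans to the first "*/" and resumes after it with prev = '/'
theorem hasMsgA_block (l : List Char) (prev : Option Char) :
    hasMsgA l prev false true = hasMsgA (skipBlockB l) (some '/') false false := by
  induction l generalizing prev with
  | nil => simp [hasMsgA, skipBlockB]
  | cons c rest ih =>
    by_cases h : c = '*' ∧ rest.head? = some '/'
    · simp [hasMsgA, skipBlockB, h]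
    · simp [hasMsgA, skipBlockB, h, ih]

theorem hasMsg_main (n : Nat) :
    ∀ (l : List Char), l.length ≤ n → ∀ (prev : Option Char),
      hasMsgA l prev false false = hasMsgB l (pvOptSpace prev) := by
  induction n with
  | zero =>
    intro l hl prev
    have : l = [] := List.eq_nil_of_length_eq_zero (Nat.le_zero.mp hl)
    subst this; simp [hasMsgA, hasMsgB]
  | succ n ih =>
    intro l hl prev
    match l with
    | [] => simp [hasMsgA, hasMsgB]
    | c :: rest =>
      have hr : rest.length ≤ n := by simp at hl; omega
      have htl : rest.tail.length ≤ rest.length := by cases rest <;> simp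
      rw [hasMsgA_step, hasMsgB_step]
      by_cases hs : PySem.Chars.isspace c = true
      · rw [if_pos hs, if_pos hs]
        have he : pvOptSpace (some c) = true := hs
        have := ih rest hr (some c)
        rwa [he] at this
      · rw [if_neg hs, if_neg hs]
        by_cases hd : c = '-' ∧ rest.head? = some '-' ∧ lineCommentStart prev rest.tail.head? = true
        · -- '--' comment in A; in B the same branch fires (c ≠ '#', c ≠ '/')
          obtain ⟨hc, hh, hb⟩ := hd
          have hbnd : pvOptSpace prev = true ∧ pvOptSpace rest.tail.head? = true := by
            have h := hb
            simp only [lineCommentStart, Bool.and_eq_true] at h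
            exact h
          subst hc
          rw [if_pos ⟨rfl, hh, hb⟩]
          rw [if_neg (show ¬(('-' : Char) = '#') by decide)]
          rw [if_neg (show ¬(('-' : Char) = '/' ∧ rest.head? = some '*') from
            fun h => absurd h.1 (by decide))]
          rw [if_pos ⟨rfl, hh, hbnd.1, hbnd.2⟩]
          rw [hasMsgA_line]
          have he : pvOptSpace (some '\n') = true := by decide
          have := ih (skipLineB rest.tail)
            (le_trans (skipLineB_length_le _) (le_trans htl hr)) (some '\n')
          rwa [he] at this
        · by_cases hp : c = '#'
          · subst hp
            rw [if_neg (show ¬(('#' : Char) = '-' ∧ rest.head? = some '-' ∧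
                lineCommentStart prev rest.tail.head? = true) from fun h => absurd h.1 (by decide))]
            rw [if_pos (rfl : ('#' : Char) = '#'), if_pos (rfl : ('#' : Char) = '#')]
            rw [hasMsgA_line]
            have he : pvOptSpace (some '\n') = true := by decide
            have := ih (skipLineB rest) (le_trans (skipLineB_length_le _) hr) (some '\n')
            rwa [he] at this
          · by_cases hbl : c = '/' ∧ rest.head? = some '*'
            · obtain ⟨hc, hh⟩ := hbl
              subst hc
              rw [if_neg (show ¬(('/' : Char) = '-' ∧ rest.head? = some '-' ∧
                  lineCommentStart prev rest.tail.head? = true) from fun h => absurd h.1 (by decide))]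
              rw [if_neg (show ¬(('/' : Char) = '#') by decide)]
              rw [if_neg (show ¬(('/' : Char) = '#') by decide)]
              rw [if_pos (⟨rfl, hh⟩ : ('/' : Char) = '/' ∧ rest.head? = some '*')]
              rw [if_pos (⟨rfl, hh⟩ : ('/' : Char) = '/' ∧ rest.head? = some '*')]
              rw [hasMsgA_block]
              have he : pvOptSpace (some '/') = false := by decide
              have := ih (skipBlockB rest.tail)
                (le_trans (skipBlockB_length_le _) (le_trans htl hr)) (some '/')
              rwa [he] at this
            · -- meaningful content: both return true
              have hdB : ¬ (c = '-' ∧ rest.head? = some '-' ∧ pvOptSpace prev = true ∧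
                  pvOptSpace rest.tail.head? = true) := by
                rintro ⟨hc, hh, h1, h2⟩
                refine hd ⟨hc, hh, ?_⟩
                simp only [lineCommentStart, Bool.and_eq_true]
                exact ⟨h1, h2⟩
              rw [if_neg hd, if_neg hp, if_neg hbl, if_neg hp, if_neg hbl, if_neg hdB]

-- ===== VERDICT (by name: the statement is the Claim_ definition above) =====
theorem has_meaningful_sql_content_py_spec : Claim_equal_has_meaningful_sql_content_py := by
  intro fragment _
  unfold Spec_has_meaningful_sql_content_py has_meaningful_sql_content_py has_meaningful_sql_content_py_alt
  have he : pvOptSpace none = true := rfl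
  have := hasMsg_main fragment.toList.length fragment.toList le_rfl none
  rwa [he] at this
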